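-- pv_equiv track=rewrite | github.com/awinter4/programming-portfolio | Data Structures and Applications/lmu-cmsi2120-fall2024-homework1-awinter4/src/finance_utils.py | get_even_redistribution
-- ===== SOURCE A (Python) =====
-- def get_even_redistribution(amounts: list[int]) -> list[int]:
--
--     # Input validation
--     if any(i < 0 for i in amounts): # check to see if any index inputted is less than 0 by looping through list/amounts
--         raise ValueError("Elements in list must be positive")
--
--     number_of_indexes: int = len(amounts) # Quantity of elements in list
--
--     if number_of_indexes == 0:
--         return []
--
--     total_sum: int = sum(amounts) # Sum of elements in list
--
--     # Compute distribution
--     even_amount: int = total_sum // number_of_indexes # Case 1: Even amount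
--     remainder: int = total_sum % number_of_indexes # Case 2: Remainder
--
--     # Create new list
--     new_list: list[int] = [even_amount] * number_of_indexes
--     # Redistribute remainder to largest indexes
--     for i in range(1, remainder + 1):
--         new_list[-i] += 1
--
--     return new_list
-- ===== SOURCE B (Python) =====
-- def get_even_redistribution(amounts: list[int]) -> list[int]:
--     if any(i < 0 for i in amounts):
--         raise ValueError("Elements in list must be positive")
--     result = []
--     total, n = sum(amounts), len(amounts)
--     while n > 0:
--         share = -(-total // n)  # ceiling of the remaining average
--         result.append(share)
--         total -= share
--         n -= 1
--     result.reverse()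
--     return result
-- ===== Notes on version B (the rewrite author's own statement) =====
-- stated objective: alternative
-- what changed: Instead of one divmod plus a fill-then-patch list, B greedily peels one share at a time: each step takes the ceiling of the remaining average (-(-total//n)), subtracts it, and the collected shares reversed give the result; no remainder is ever computed.
import Mathlib
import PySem

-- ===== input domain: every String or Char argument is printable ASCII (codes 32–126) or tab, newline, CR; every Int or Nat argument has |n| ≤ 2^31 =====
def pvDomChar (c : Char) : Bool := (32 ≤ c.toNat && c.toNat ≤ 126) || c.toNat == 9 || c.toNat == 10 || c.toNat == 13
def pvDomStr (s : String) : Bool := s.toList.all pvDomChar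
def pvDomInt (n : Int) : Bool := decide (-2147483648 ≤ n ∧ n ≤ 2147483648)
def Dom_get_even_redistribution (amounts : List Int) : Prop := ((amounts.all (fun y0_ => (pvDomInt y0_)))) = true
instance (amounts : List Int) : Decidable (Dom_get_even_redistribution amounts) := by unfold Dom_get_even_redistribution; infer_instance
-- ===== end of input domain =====

-- B replaces A's divmod fill-then-patch construction by a greedy loop that peels off
-- the ceiling of the remaining average one element at a time (alternative algorithm).


-- ===== PORT A =====
-- Literal port of A: negativity guard (ValueError → excluded by Pre_, port returns []),
-- n == 0 early return, uniform list [even_amount]*n, then for i in range(1, remainder+1): new_list[-i] += 1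
-- (negative index -i resolves to position n - i, always in range here since 0 ≤ remainder < n).
def get_even_redistribution (amounts : List Int) : List Int :=
  if amounts.any (fun i => decide (i < 0)) then []   -- Python raises ValueError here (outside Pre_)
  else
    let number_of_indexes : Nat := amounts.length
    if number_of_indexes = 0 then []
    else
      let total_sum : Int := amounts.foldl (· + ·) 0
      let even_amount : Int := PySem.Int.floordiv total_sum (number_of_indexes : Int)
      let remainder : Int := PySem.Int.mod total_sum (number_of_indexes : Int)
      (PySem.List.pyRange 1 (remainder + 1)).foldl
        (fun l i => l.modify ((number_of_indexes : Int) - i).toNat (fun x => x + 1))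
        (List.replicate number_of_indexes even_amount)

-- ===== PORT B =====
-- The while loop of Source B: state (total, n, result); each turn appends -(-total//n),
-- subtracts it from total and decrements n; the result is reversed at the end.
def pvAltLoop : Nat → Int → List Int → List Int
  | 0, _, result => result
  | (m+1), total, result =>
      let share : Int := -(PySem.Int.floordiv (-total) ((m+1 : Nat) : Int))
      pvAltLoop m (total - share) (result ++ [share])

def get_even_redistribution_alt (amounts : List Int) : List Int :=
  if amounts.any (fun i => decide (i < 0)) then []   -- Python raises ValueError here (outside Pre_)
  else (pvAltLoop amounts.length (amounts.foldl (· + ·) 0) []).reverse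

-- ===== PRECONDITION & SPEC =====
-- Pre_ excludes exactly the inputs with a negative element, on which A raises ValueError.
def Pre_get_even_redistribution (amounts : List Int) : Prop := ∀ x ∈ amounts, 0 ≤ x
instance (amounts : List Int) : Decidable (Pre_get_even_redistribution amounts) := by unfold Pre_get_even_redistribution; infer_instance
def pvWitness_get_even_redistribution : List Int := [1, 2, 4]
def Spec_get_even_redistribution (amounts : List Int) (out : List Int) : Prop := out = get_even_redistribution_alt amounts
instance (amounts : List Int) (out : List Int) : Decidable (Spec_get_even_redistribution amounts out) := by unfold Spec_get_even_redistribution; infer_instance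

-- ===== CLAIM =====
def Claim_equal_get_even_redistribution : Prop := ∀ (amounts : List Int), Dom_get_even_redistribution amounts → Pre_get_even_redistribution amounts → Spec_get_even_redistribution amounts (get_even_redistribution amounts)

-- ===== LEMMAS AND PROOFS =====

-- A's patch loop over range(1, k+1) on [e]*n equals the two-block concatenation.
lemma fold_patch_eq_concat (e : Int) (n k : Nat) (hk : k < n) :
    (PySem.List.pyRange 1 ((k : Int) + 1)).foldl
      (fun l i => l.modify ((n : Int) - i).toNat (fun x => x + 1))
      (List.replicate n e)
    = List.replicate (n - k) e ++ List.replicate k (e + 1) := by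
  induction k with
  | zero =>
      simp [PySem.List.pyRange]
  | succ k ih =>
      have hk' : k < n := Nat.lt_of_succ_lt hk
      have h1 : (1 : Int) ≤ (k : Int) + 1 := by omega
      have hb : (((k + 1 : Nat) : Int) + 1) = ((k : Int) + 1) + 1 := by push_cast; ring
      rw [hb, PySem.List.pyRange_one_succ_right h1, List.foldl_append, ih hk']
      simp only [List.foldl_cons, List.foldl_nil]
      have hidx : ((n : Int) - ((k : Int) + 1)).toNat = n - (k + 1) := by omega
      rw [hidx]
      apply List.ext_getElem
      · simp; omega
      · intro j hj1 hj2
        simp only [List.getElem_modify, List.getElem_append, List.getElem_replicate,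
          List.length_replicate]
        simp only [List.length_modify, List.length_append, List.length_replicate] at hj1
        split_ifs <;> first | rfl | omega

-- The accumulator of pvAltLoop only ever grows on the left.
lemma pvAltLoop_acc (n : Nat) : ∀ (total : Int) (res : List Int),
    pvAltLoop n total res = res ++ pvAltLoop n total [] := by
  induction n with
  | zero => intro total res; simp [pvAltLoop]
  | succ m ih =>
      intro total res
      simp only [pvAltLoop]
      rw [ih (total - _) (res ++ [_]), ih (total - _) ([] ++ [_])]
      simp

-- B's peeling loop, started on total = q*n + r with 0 ≤ r < n, produces the r
-- incremented shares first, then the n - r even shares.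
lemma pvAltLoop_peel : ∀ (n : Nat) (q : Int) (k : Nat), k < n →
    pvAltLoop n (q * n + (k : Int)) [] =
      List.replicate k (q + 1) ++ List.replicate (n - k) q := by
  intro n
  induction n with
  | zero => intro q k hk; omega
  | succ m ih =>
      intro q k hk
      have hnpos : (0 : Int) < ((m + 1 : Nat) : Int) := by push_cast; omega
      by_cases hr : k = 0
      · subst hr
        have hshare : -(PySem.Int.floordiv (-(q * ((m+1 : Nat) : Int) + ((0 : Nat) : Int))) ((m+1 : Nat) : Int)) = q := by
          rw [PySem.Int.neg_floordiv_neg_eq_iff_of_pos hnpos]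
          push_cast
          constructor <;> nlinarith
        simp only [pvAltLoop, hshare]
        rw [pvAltLoop_acc]
        by_cases hm : m = 0
        · subst hm; simp [pvAltLoop]
        · have hrec := ih q 0 (Nat.pos_of_ne_zero hm)
          have harg : q * ((m+1 : Nat) : Int) + ((0 : Nat) : Int) - q = q * (m : Int) + ((0 : Nat) : Int) := by
            push_cast; ring
          rw [harg, hrec]
          simp [List.replicate_succ]
      · have hk1 : 1 ≤ k := Nat.pos_of_ne_zero hr
        have hshare : -(PySem.Int.floordiv (-(q * ((m+1 : Nat) : Int) + (k : Int))) ((m+1 : Nat) : Int)) = q + 1 := by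
          rw [PySem.Int.neg_floordiv_neg_eq_iff_of_pos hnpos]
          have hkm : (k : Int) ≤ (m : Int) := by exact_mod_cast Nat.lt_succ_iff.mp hk
          push_cast at hkm ⊢
          constructor <;> nlinarith
        simp only [pvAltLoop, hshare]
        rw [pvAltLoop_acc]
        have hklt : k - 1 < m := by omega
        have hrec := ih q (k - 1) hklt
        have harg : q * ((m+1 : Nat) : Int) + (k : Int) - (q + 1) = q * (m : Int) + ((k - 1 : Nat) : Int) := by
          push_cast [Nat.cast_sub hk1]; ring
        rw [harg, hrec]
        have h2' : m - (k - 1) = (m + 1) - k := by omega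
        rw [h2']
        have hks : k = (k - 1) + 1 := by omega
        rw [hks, List.replicate_succ]
        simp

-- Both constructions coincide for any total and nonzero length.
lemma combined_eq (n : Nat) (t : Int) (hn : n ≠ 0) :
    (PySem.List.pyRange 1 (PySem.Int.mod t (n : Int) + 1)).foldl
      (fun l i => l.modify ((n : Int) - i).toNat (fun x => x + 1))
      (List.replicate n (PySem.Int.floordiv t (n : Int)))
    = (pvAltLoop n t []).reverse := by
  have hnpos : (0 : Int) < (n : Int) := by exact_mod_cast Nat.pos_of_ne_zero hn
  obtain ⟨k, hk⟩ : ∃ k : Nat, PySem.Int.mod t (n : Int) = (k : Int) :=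
    ⟨(PySem.Int.mod t (n : Int)).toNat,
      (Int.toNat_of_nonneg (PySem.Int.mod_nonneg t hnpos)).symm⟩
  have hklt : k < n := by
    have := PySem.Int.mod_lt t hnpos
    rw [hk] at this; exact_mod_cast this
  have ht : t = PySem.Int.floordiv t (n : Int) * (n : Int) + (k : Int) := by
    rw [← hk]; exact (PySem.Int.floordiv_mul_add_mod t _).symm
  rw [hk]
  conv_rhs => rw [ht]
  rw [pvAltLoop_peel n _ k hklt, fold_patch_eq_concat _ n k hklt]
  simp

-- ===== VERDICT =====
theorem get_even_redistribution_spec : Claim_equal_get_even_redistribution := by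
  intro amounts _ hpre
  unfold Spec_get_even_redistribution get_even_redistribution get_even_redistribution_alt
  have hany : amounts.any (fun i => decide (i < 0)) = false := by
    simp only [List.any_eq_false]
    intro x hx
    simpa using hpre x hx
  by_cases hlen : amounts.length = 0
  · simp [hany, hlen, pvAltLoop]
  · simp only [hany, Bool.false_eq_true, if_false, if_neg hlen]
    exact combined_eq amounts.length (amounts.foldl (· + ·) 0) hlen
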